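-- pv_equiv track=rewrite | github.com/TylerMorley/advent-of-code | 2023/code/day03.py | getRowNumbers
-- ===== SOURCE A (Python) =====
-- def getRowNumbers(row):
--     numbers = []
--     untrimmed_nums = [x for x in row.split('.') if x]
--     for num in untrimmed_nums:
--         num = ''.join([x for x in num if x.isdigit()])
--         if num:
--              numbers.append(num)
--     return numbers
-- ===== SOURCE B (Python) =====
-- def getRowNumbers(row):
--     numbers = []
--     cur = ''
--     for ch in row:
--         if ch.isdigit():
--             cur += ch
--         elif ch == '.':
--             if cur:
--                 numbers.append(cur)
--             cur = ''
--     if cur: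
--         numbers.append(cur)
--     return numbers
-- ===== Notes on version B (the rewrite author's own statement) =====
-- stated objective: simpler
-- what changed: Replaces split-on-'.' plus per-segment digit-filter comprehension with a single stateful character scan that accumulates digits and flushes the accumulator on '.' and at end of string.
import Mathlib
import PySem

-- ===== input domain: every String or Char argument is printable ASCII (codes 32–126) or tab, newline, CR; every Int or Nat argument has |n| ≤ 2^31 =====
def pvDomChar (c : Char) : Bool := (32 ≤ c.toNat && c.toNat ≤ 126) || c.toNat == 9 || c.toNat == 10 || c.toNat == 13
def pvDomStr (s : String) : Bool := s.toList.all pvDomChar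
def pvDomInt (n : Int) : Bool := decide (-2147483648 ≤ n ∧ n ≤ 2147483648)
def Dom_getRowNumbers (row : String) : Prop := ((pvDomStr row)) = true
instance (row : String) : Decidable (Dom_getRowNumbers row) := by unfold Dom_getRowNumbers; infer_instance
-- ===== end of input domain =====

-- B replaces split('.') + per-segment digit-filter comprehensions by one stateful
-- character scan (digit accumulator flushed on '.' and at end); same O(n) cost, simpler.

-- ===== PORT A =====
-- body of A's for-loop: join the digit chars of the segment, append if non-empty
def aStep (numbers : List String) (num : List Char) : List String :=
  let num2 := num.filter PySem.Chars.isdigit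
  if num2 ≠ [] then numbers ++ [String.mk num2] else numbers

def getRowNumbers (row : String) : List String :=
  let untrimmed := (PySem.Chars.splitOn row.toList ['.']).filter (fun x => decide (x ≠ []))
  untrimmed.foldl aStep []

-- ===== PORT B =====
-- body of B's for-loop over (numbers, cur)
def altStep (st : List (List Char) × List Char) (c : Char) : List (List Char) × List Char :=
  if PySem.Chars.isdigit c then (st.1, st.2 ++ [c])
  else if c = '.' then (if st.2 = [] then st.1 else st.1 ++ [st.2], [])
  else st

def getRowNumbers_alt (row : String) : List String :=
  let st := row.toList.foldl altStep ([], [])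
  (if st.2 = [] then st.1 else st.1 ++ [st.2]).map String.mk

-- ===== PRECONDITION & SPEC =====
def Spec_getRowNumbers (row : String) (out : List String) : Prop := out = getRowNumbers_alt row
instance (row : String) (out : List String) : Decidable (Spec_getRowNumbers row out) := by unfold Spec_getRowNumbers; infer_instance

-- ===== CLAIM (what is proved, stated in full; the proofs are below) =====
def Claim_equal_getRowNumbers : Prop := ∀ (row : String), Dom_getRowNumbers row → Spec_getRowNumbers row (getRowNumbers row)

-- ===== LEMMAS AND PROOFS =====

-- simple recursive characterization of splitOn on the single-char separator '.'
def splitAux : List Char → List Char → List (List Char)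
  | [], pre => [pre.reverse]
  | c :: rest, pre => if c = '.' then pre.reverse :: splitAux rest [] else splitAux rest (c :: pre)

-- digit filter of a segment
def dseg (seg : List Char) : List Char := seg.filter PySem.Chars.isdigit

lemma go_eq : ∀ (fuel : Nat) (l cur : List Char) (acc : List (List Char)),
    l.length < fuel →
    PySem.Chars.splitOn.go ['.'] fuel l cur acc = acc.reverse ++ splitAux l cur := by
  intro fuel
  induction fuel with
  | zero => intro l cur acc h; omega
  | succ n ih =>
    intro l cur acc h
    cases l with
    | nil => simp [PySem.Chars.splitOn.go, splitAux]
    | cons c rest =>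
      by_cases hc : c = '.'
      · subst hc
        simp only [PySem.Chars.splitOn.go, List.isPrefixOf, BEq.rfl, Bool.true_and,
          if_true, List.length_cons, List.length_nil,
          List.drop_succ_cons, List.drop_zero]
        rw [ih rest [] (cur.reverse :: acc) (by simpa using Nat.lt_of_succ_lt_succ h)]
        simp [splitAux]
      · have hpre : (['.'].isPrefixOf (c :: rest)) = false := by
          simp [List.isPrefixOf]
          exact fun h' => hc h'.symm
        simp only [PySem.Chars.splitOn.go, hpre, Bool.false_eq_true, not_false_eq_true,
          if_neg]
        rw [ih rest (c :: cur) acc (by simpa using Nat.lt_of_succ_lt_succ h)]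
        simp [splitAux, hc]

lemma splitOn_eq (cs : List Char) : PySem.Chars.splitOn cs ['.'] = splitAux cs [] := by
  have := go_eq (cs.length + 1) cs [] [] (by omega)
  simpa [PySem.Chars.splitOn] using this

lemma aStep_eq (numbers : List String) (num : List Char) :
    aStep numbers num = if dseg num ≠ [] then numbers ++ [String.mk (dseg num)] else numbers := rfl

-- empty segments are skipped by A's loop body anyway, so the pre-filter is a no-op
lemma filter_skip : ∀ (segs : List (List Char)) (numbers : List String),
    (segs.filter (fun x => !decide (x = []))).foldl aStep numbers = segs.foldl aStep numbers := by
  intro segs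
  induction segs with
  | nil => intro numbers; rfl
  | cons s rest ih =>
    intro numbers
    by_cases hs : s = []
    · subst hs
      simp only [List.filter_cons, decide_true, Bool.not_true, Bool.false_eq_true, if_neg,
        not_false_eq_true, List.foldl_cons]
      rw [ih]
      have : aStep numbers [] = numbers := by simp [aStep_eq, dseg]
      rw [this]
    · simp only [List.filter_cons, hs, decide_false, Bool.not_false, if_pos, List.foldl_cons]
      exact ih (aStep numbers s)

-- A's loop computes: append the non-empty digit filters of the segments
lemma aFold_eq : ∀ (segs : List (List Char)) (numbers : List String),
    segs.foldl aStep numbers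
      = numbers ++ (((segs.map dseg).filter (fun x => !decide (x = []))).map String.mk) := by
  intro segs
  induction segs with
  | nil => intro numbers; simp
  | cons s rest ih =>
    intro numbers
    simp only [List.foldl_cons, List.map_cons, List.filter_cons]
    rw [ih, aStep_eq]
    by_cases hd : dseg s = []
    · simp [hd]
    · simp [hd, List.append_assoc]

-- main invariant: B's scan starting from accumulator (acc, digits of pre.reverse)
-- finalizes to acc ++ A's pipeline over the segments splitAux produces from pre
lemma main_inv : ∀ (cs pre : List Char) (acc : List (List Char)),
    (let st := cs.foldl altStep (acc, dseg pre.reverse)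
     if st.2 = [] then st.1 else st.1 ++ [st.2])
      = acc ++ ((splitAux cs pre).map dseg).filter (fun x => !decide (x = [])) := by
  intro cs
  induction cs with
  | nil =>
    intro pre acc
    by_cases h : dseg pre.reverse = [] <;> simp [splitAux, h]
  | cons c rest ih =>
    intro pre acc
    by_cases hdig : PySem.Chars.isdigit c = true
    · have hc : c ≠ '.' := by intro h; rw [h] at hdig; exact absurd hdig (by decide)
      have hdp : dseg ((c :: pre).reverse) = dseg pre.reverse ++ [c] := by
        simp [dseg, List.filter_append, hdig]
      have h2 := ih (c :: pre) acc
      rw [hdp] at h2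
      simp only [List.foldl_cons, altStep, hdig, if_true]
      rw [h2]
      simp [splitAux, hc]
    · by_cases hc : c = '.'
      · subst hc
        simp only [List.foldl_cons, altStep, hdig, Bool.false_eq_true, not_false_eq_true,
          if_neg, if_pos]
        have hnil : dseg (([] : List Char)).reverse = ([] : List Char) := by simp [dseg]
        by_cases h : dseg pre.reverse = []
        · have h2 := ih [] acc
          rw [hnil] at h2
          simp only [h, if_pos]
          rw [h2]
          simp [splitAux, h]
        · have h2 := ih [] (acc ++ [dseg pre.reverse])
          rw [hnil] at h2
          simp only [h, if_neg, not_false_eq_true]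
          rw [h2]
          simp [splitAux, h, List.append_assoc]
      · have hdp : dseg ((c :: pre).reverse) = dseg pre.reverse := by
          simp [dseg, List.filter_append, hdig]
        have h2 := ih (c :: pre) acc
        rw [hdp] at h2
        simp only [List.foldl_cons, altStep, hdig, hc, Bool.false_eq_true, not_false_eq_true,
          if_neg]
        rw [h2]
        simp [splitAux, hc]

-- ===== VERDICT (by name: the statement is the Claim_ definition above) =====
theorem getRowNumbers_spec : Claim_equal_getRowNumbers := by
  intro row _
  unfold Spec_getRowNumbers getRowNumbers getRowNumbers_alt
  simp only [ne_eq, decide_not]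
  rw [splitOn_eq, filter_skip, aFold_eq]
  have h2 := main_inv row.toList [] []
  simp only [List.reverse_nil] at h2
  have hnil : dseg ([] : List Char) = ([] : List Char) := by simp [dseg]
  rw [hnil] at h2
  simp only [List.nil_append] at h2 ⊢
  rw [h2]
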